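-- pv_equiv track=rewrite | github.com/Harshith1234567/520-Project2 | Bot4.py | find_crew_found_inside_detection_grid
-- ===== SOURCE A (Python) =====
-- crew_alien_grid_size = 5
--
-- def find_crew_found_inside_detection_grid(grid, aliens, x, y):
--     x_start = x - (crew_alien_grid_size // 2)
--     x_end = x - (crew_alien_grid_size // 2) + crew_alien_grid_size - 1
--     y_start = y - (crew_alien_grid_size // 2)
--     y_end = y - (crew_alien_grid_size // 2) + crew_alien_grid_size - 1
--
--     for i in range(x_start, x_end + 1):
--         for j in range(y_start, y_end + 1):
--             if (i, j) in aliens: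
--                 return True
--     return False
-- ===== SOURCE B (Python) =====
-- def find_crew_found_inside_detection_grid(grid, aliens, x, y):
--     x_start = x - 2
--     x_end = x + 2
--     y_start = y - 2
--     y_end = y + 2
--     for (ax, ay) in aliens:
--         if x_start <= ax <= x_end and y_start <= ay <= y_end:
--             return True
--     return False
-- ===== Notes on version B (the rewrite author's own statement) =====
-- stated objective: idiomatic
-- what changed: Instead of scanning all 25 cells of the 5x5 box and testing each for membership in aliens, B makes one pass over the aliens collection and tests each coordinate against the inclusive box bounds.
import Mathlib
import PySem

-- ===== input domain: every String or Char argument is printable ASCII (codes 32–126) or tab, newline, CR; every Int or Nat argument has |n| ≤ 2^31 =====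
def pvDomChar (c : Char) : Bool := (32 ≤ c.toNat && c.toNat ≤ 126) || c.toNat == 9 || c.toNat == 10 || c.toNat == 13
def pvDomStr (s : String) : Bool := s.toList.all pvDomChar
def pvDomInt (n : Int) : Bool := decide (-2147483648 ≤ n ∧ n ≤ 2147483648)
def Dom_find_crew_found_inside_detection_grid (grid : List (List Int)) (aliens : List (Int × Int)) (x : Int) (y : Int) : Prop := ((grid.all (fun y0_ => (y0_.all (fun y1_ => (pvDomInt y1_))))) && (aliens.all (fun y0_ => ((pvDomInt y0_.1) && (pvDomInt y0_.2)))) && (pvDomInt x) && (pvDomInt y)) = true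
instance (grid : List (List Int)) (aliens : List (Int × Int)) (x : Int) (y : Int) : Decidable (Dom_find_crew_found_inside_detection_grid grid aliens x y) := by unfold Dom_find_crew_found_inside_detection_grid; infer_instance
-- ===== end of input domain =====

-- B replaces A's 25-cell scan of the 5×5 box (membership test per cell) by a single pass
-- over the aliens collection with an inclusive bounds test (idiomatic; same result).

-- ===== PORT A =====
def find_crew_found_inside_detection_grid (grid : List (List Int)) (aliens : List (Int × Int)) (x : Int) (y : Int) : Bool :=
  let x_start := x - PySem.Int.floordiv 5 2
  let x_end := x - PySem.Int.floordiv 5 2 + 5 - 1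
  let y_start := y - PySem.Int.floordiv 5 2
  let y_end := y - PySem.Int.floordiv 5 2 + 5 - 1
  -- for i … for j … if (i,j) in aliens: return True; return False  — early return = List.any
  (PySem.List.pyRange x_start (x_end + 1) 1).any (fun i =>
    (PySem.List.pyRange y_start (y_end + 1) 1).any (fun j =>
      decide ((i, j) ∈ aliens)))

-- ===== PORT B =====
def find_crew_found_inside_detection_grid_alt (grid : List (List Int)) (aliens : List (Int × Int)) (x : Int) (y : Int) : Bool :=
  let x_start := x - 2
  let x_end := x + 2
  let y_start := y - 2
  let y_end := y + 2
  aliens.any (fun p =>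
    x_start ≤ p.1 && p.1 ≤ x_end && y_start ≤ p.2 && p.2 ≤ y_end)

-- ===== PRECONDITION & SPEC =====
def Spec_find_crew_found_inside_detection_grid (grid : List (List Int)) (aliens : List (Int × Int)) (x : Int) (y : Int) (out : Bool) : Prop := out = find_crew_found_inside_detection_grid_alt grid aliens x y
instance (grid : List (List Int)) (aliens : List (Int × Int)) (x : Int) (y : Int) (out : Bool) : Decidable (Spec_find_crew_found_inside_detection_grid grid aliens x y out) := by unfold Spec_find_crew_found_inside_detection_grid; infer_instance

-- ===== CLAIM (what is proved, stated in full; the proofs are below) =====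
def Claim_equal_find_crew_found_inside_detection_grid : Prop := ∀ (grid : List (List Int)) (aliens : List (Int × Int)) (x : Int) (y : Int), Dom_find_crew_found_inside_detection_grid grid aliens x y → Spec_find_crew_found_inside_detection_grid grid aliens x y (find_crew_found_inside_detection_grid grid aliens x y)

-- ===== LEMMAS AND PROOFS =====

-- ===== VERDICT (by name: the statement is the Claim_ definition above) =====
theorem find_crew_found_inside_detection_grid_spec : Claim_equal_find_crew_found_inside_detection_grid := by
  intro grid aliens x y _
  unfold Spec_find_crew_found_inside_detection_grid
  unfold find_crew_found_inside_detection_grid find_crew_found_inside_detection_grid_alt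
  have h52 : PySem.Int.floordiv 5 2 = 2 := by decide
  rw [h52, Bool.eq_iff_iff]
  simp only [List.any_eq_true, PySem.List.mem_pyRange_one, decide_eq_true_eq,
    Bool.and_eq_true, decide_eq_true_eq]
  constructor
  · rintro ⟨i, ⟨hi1, hi2⟩, j, ⟨hj1, hj2⟩, hm⟩
    exact ⟨(i, j), hm, by simp; omega⟩
  · rintro ⟨⟨a, b⟩, hm, h⟩
    simp only [] at h
    exact ⟨a, ⟨by omega, by omega⟩, b, ⟨by omega, by omega⟩, hm⟩
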